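-- pv_equiv track=rewrite | github.com/wjs2063/BaekJoon | 프로그래머스/unrated/155652. 둘만의 암호/둘만의 암호.py | solution
-- ===== SOURCE A (Python) =====
-- def solution(s, skip, index):
--     answer = ''
--     for x in s:
--         x = ord(x) - ord("a")
--         cnt = 0
--         while cnt < index:
--             x = (x + 1) % 26
--             if chr(x + ord("a")) not in skip:
--                 cnt += 1
--         answer += chr(x + ord("a"))
--
--
--     return answer
-- ===== SOURCE B (Python) =====
-- def solution(s, skip, index):
--     if index <= 0:
--         return s
--     allowed = [i for i in range(26) if chr(i + 97) not in skip]
--     m = len(allowed)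
--     out = []
--     for ch in s:
--         x0 = (ord(ch) - 97) % 26
--         j = sum(1 for p in allowed if p <= x0)
--         out.append(chr(allowed[(j + index - 1) % m] + 97))
--     return ''.join(out)
-- ===== Notes on version B (the rewrite author's own statement) =====
-- stated objective: faster
-- what changed: A advances one letter at a time, testing membership in skip at each of the ~index steps per character; B precomputes the 26-entry allowed-letter list once and jumps each character directly to allowed[(count_of_allowed_letters_<=_start + index - 1) % len(allowed)].
import Mathlib
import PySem

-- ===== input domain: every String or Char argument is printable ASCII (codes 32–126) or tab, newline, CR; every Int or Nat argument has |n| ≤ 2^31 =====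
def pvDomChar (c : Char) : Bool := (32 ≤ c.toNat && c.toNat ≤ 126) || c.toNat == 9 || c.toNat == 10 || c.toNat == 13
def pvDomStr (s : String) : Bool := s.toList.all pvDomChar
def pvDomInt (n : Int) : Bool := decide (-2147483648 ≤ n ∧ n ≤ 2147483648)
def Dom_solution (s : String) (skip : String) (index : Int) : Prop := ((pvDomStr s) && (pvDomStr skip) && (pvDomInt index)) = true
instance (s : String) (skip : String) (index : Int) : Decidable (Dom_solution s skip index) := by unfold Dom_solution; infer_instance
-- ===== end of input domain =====

-- B replaces A's per-character while loop (index iterations of step-and-test) by a jump into the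
-- precomputed list of unskipped letters: position (count-of-allowed-≤-start + index - 1) mod (#allowed).

-- chr(x + ord("a")) (shared by both ports)
def pvChr (x : Int) : Char := Char.ofNat (x + 97).toNat

-- 'chr(x + 97) not in skip' (single-character substring test; shared by both ports)
def pvAllowed (skip : String) (x : Int) : Bool := !(PySem.Str.isIn (String.ofList [pvChr x]) skip)

-- ===== PORT A =====
-- A's while loop 'while cnt < index: x = (x+1)%26; if chr(x+97) not in skip: cnt += 1' is ported
-- step for step: the outer recursion counts the `index` hits (cnt), the inner recursion is the scan
-- between two consecutive hits (at most 26 steps: after 26 steps every residue has been visited, so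
-- if no letter is unskipped Python diverges — those inputs are excluded by Pre_solution, and the
-- 'none' fallback below is never reached there).
def solutionFind (skip : String) (x : Int) : Nat → Option Int
  | 0 => none
  | f + 1 =>
    let x' := PySem.Int.mod (x + 1) 26
    if pvAllowed skip x' then some x' else solutionFind skip x' f

def solutionLoop (skip : String) (x : Int) : Nat → Int
  | 0 => x
  | n + 1 =>
    match solutionFind skip x 26 with
    | some x' => solutionLoop skip x' n
    | none => x   -- unreachable under Pre_solution (Python diverges here)

def solution (s : String) (skip : String) (index : Int) : String :=
  String.ofList (s.toList.foldl
    (fun acc c => acc ++ [pvChr (solutionLoop skip ((c.toNat : Int) - 97) index.toNat)]) [])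

-- ===== PORT B =====
-- allowed = [i for i in range(26) if chr(i + 97) not in skip]
def solutionAllowed (skip : String) : List Int :=
  (PySem.List.pyRange 0 26 1).filter (fun i => pvAllowed skip i)

def solution_alt (s : String) (skip : String) (index : Int) : String :=
  if index ≤ 0 then s
  else
    let allowed := solutionAllowed skip
    let m : Int := (allowed.length : Int)
    String.ofList (s.toList.map (fun c =>
      let x0 := PySem.Int.mod ((c.toNat : Int) - 97) 26
      let j : Int := (allowed.countP (fun p => decide (p ≤ x0)) : Int)
      -- allowed[(j + index - 1) % m]: in range whenever m > 0 (guaranteed by Pre_), .getD 0 only totalizes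
      pvChr ((PySem.List.pyGet? allowed (PySem.Int.mod (j + index - 1) m)).getD 0)))

-- ===== PRECONDITION & SPEC =====
-- Pre_ excludes only inputs where A DIVERGES (returns nothing): index > 0 while every lowercase
-- letter occurs in skip; B raises ZeroDivisionError there.
def Pre_solution (s : String) (skip : String) (index : Int) : Prop :=
  index ≤ 0 ∨ (PySem.List.pyRange 0 26 1).any (fun i => pvAllowed skip i) = true
instance (s : String) (skip : String) (index : Int) : Decidable (Pre_solution s skip index) := by
  unfold Pre_solution; infer_instance

def pvWitness_solution : String × String × Int := ("aztec!", "bcd", 5)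

def Spec_solution (s : String) (skip : String) (index : Int) (out : String) : Prop := out = solution_alt s skip index
instance (s : String) (skip : String) (index : Int) (out : String) : Decidable (Spec_solution s skip index out) := by unfold Spec_solution; infer_instance

-- ===== CLAIM (what is proved, stated in full; the proofs are below) =====
def Claim_equal_solution : Prop := ∀ (s : String) (skip : String) (index : Int), Dom_solution s skip index → Pre_solution s skip index → Spec_solution s skip index (solution s skip index)

-- ===== LEMMAS AND PROOFS =====

theorem pv_mem_allowed (skip : String) (p : Int) :
    p ∈ solutionAllowed skip ↔ (0 ≤ p ∧ p < 26 ∧ pvAllowed skip p = true) := by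
  simp [solutionAllowed, List.mem_filter, PySem.List.mem_pyRange_one, and_assoc]

theorem pv_pairwise_allowed (skip : String) : (solutionAllowed skip).Pairwise (· < ·) :=
  (PySem.List.pairwise_lt_pyRange_one 0 26).filter _

-- on a strictly sorted list, the element at position (count of elements ≤ x) is the least element > x
theorem pv_sorted_next (L : List Int) (hL : L.Pairwise (· < ·)) (x : Int)
    (h : L.countP (fun p => decide (p ≤ x)) < L.length) :
    x < L.getD (L.countP (fun p => decide (p ≤ x))) 0 ∧
      ∀ z ∈ L, x < z → L.getD (L.countP (fun p => decide (p ≤ x))) 0 ≤ z := by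
  induction L with
  | nil => simp at h
  | cons a t ih =>
    rcases List.pairwise_cons.mp hL with ⟨ha, ht⟩
    by_cases hax : a ≤ x
    · have hc : (a :: t).countP (fun p => decide (p ≤ x)) = t.countP (fun p => decide (p ≤ x)) + 1 := by
        simp [hax]
      rw [hc] at h ⊢
      simp only [List.getD_cons_succ]
      have h' : t.countP (fun p => decide (p ≤ x)) < t.length := by simpa using h
      obtain ⟨h1, h2⟩ := ih ht h'
      refine ⟨h1, ?_⟩
      intro z hz hxz
      rcases List.mem_cons.mp hz with rfl | hz'
      · omega
      · exact h2 z hz' hxz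
    · have hc : (a :: t).countP (fun p => decide (p ≤ x)) = 0 := by
        simp only [List.countP_cons, decide_eq_true_eq]
        have : t.countP (fun p => decide (p ≤ x)) = 0 := by
          rw [List.countP_eq_zero]
          intro z hz
          have := ha z hz
          simp only [decide_eq_true_eq]
          omega
        simp [this, hax]
      rw [hc]
      simp only [List.getD_cons_zero]
      refine ⟨by omega, ?_⟩
      intro z hz _
      rcases List.mem_cons.mp hz with rfl | hz'
      · omega
      · exact le_of_lt (ha z hz')

-- head of a strictly sorted list is its minimum
theorem pv_sorted_head_le (L : List Int) (hL : L.Pairwise (· < ·)) (z : Int) (hz : z ∈ L) :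
    L.getD 0 0 ≤ z := by
  cases L with
  | nil => simp at hz
  | cons a t =>
    rcases List.mem_cons.mp hz with rfl | hz'
    · simp
    · simpa using le_of_lt (List.rel_of_pairwise_cons hL hz')

-- counting elements ≤ the i-th element of a strictly sorted list gives i + 1
theorem pv_sorted_count_self (L : List Int) (hL : L.Pairwise (· < ·)) (i : Nat) (h : i < L.length) :
    L.countP (fun p => decide (p ≤ L.getD i 0)) = i + 1 := by
  induction L generalizing i with
  | nil => simp at h
  | cons a t ih =>
    rcases List.pairwise_cons.mp hL with ⟨ha, ht⟩
    cases i with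
    | zero =>
      simp only [List.getD_cons_zero, List.countP_cons, decide_eq_true_eq]
      have : t.countP (fun p => decide (p ≤ a)) = 0 := by
        rw [List.countP_eq_zero]
        intro z hz
        have := ha z hz
        simp only [decide_eq_true_eq]
        omega
      simp [this]
    | succ i =>
      simp only [List.getD_cons_succ, List.countP_cons, decide_eq_true_eq]
      have hlt : i < t.length := by simpa using h
      have hmem : t.getD i 0 ∈ t := by
        rw [List.getD_eq_getElem t 0 hlt]
        exact List.getElem_mem hlt
      have := ha _ hmem
      rw [ih ht i hlt]
      have h2 : a ≤ t.getD i 0 := le_of_lt this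
      rw [List.getD_eq_getElem?_getD] at h2
      simp [h2]

-- the scan's first step only depends on the start modulo 26
theorem pv_find_norm (skip : String) (f : Nat) (x : Int) :
    solutionFind skip x f = solutionFind skip (PySem.Int.mod x 26) f := by
  cases f with
  | zero => rfl
  | succ f =>
    have h1 : PySem.Int.mod (x + 1) 26 = (x + 1) % 26 :=
      PySem.Int.mod_eq_emod_of_pos (by norm_num)
    have h2 : PySem.Int.mod x 26 = x % 26 :=
      PySem.Int.mod_eq_emod_of_pos (by norm_num)
    have h3 : PySem.Int.mod (PySem.Int.mod x 26 + 1) 26 = (PySem.Int.mod x 26 + 1) % 26 :=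
      PySem.Int.mod_eq_emod_of_pos (by norm_num)
    have key : PySem.Int.mod (x + 1) 26 = PySem.Int.mod (PySem.Int.mod x 26 + 1) 26 := by
      rw [h1, h3, h2]; omega
    simp only [solutionFind, key]

-- the scan returns the cyclically nearest allowed residue, given enough fuel
theorem pv_find_spec (skip : String) (f : Nat) :
    ∀ (x y : Int), 0 ≤ x → x < 26 → y ∈ solutionAllowed skip →
    (∀ z ∈ solutionAllowed skip, (y - x - 1) % 26 ≤ (z - x - 1) % 26) →
    (y - x - 1) % 26 + 1 ≤ (f : Int) → solutionFind skip x f = some y := by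
  induction f with
  | zero =>
    intro x y _ _ _ _ hf
    exfalso
    have := Int.emod_nonneg (y - x - 1) (by norm_num : (26:Int) ≠ 0)
    simp at hf
    omega
  | succ f ih =>
    intro x y hx0 hx26 hy hmin hf
    have hx1 : PySem.Int.mod (x + 1) 26 = (x + 1) % 26 :=
      PySem.Int.mod_eq_emod_of_pos (by norm_num)
    obtain ⟨hy0, hy26, hyal⟩ := (pv_mem_allowed skip y).mp hy
    by_cases hal : pvAllowed skip (PySem.Int.mod (x + 1) 26) = true
    · simp only [solutionFind, hal, if_true]
      have hx1mem : PySem.Int.mod (x + 1) 26 ∈ solutionAllowed skip := by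
        rw [pv_mem_allowed]
        refine ⟨?_, ?_, hal⟩ <;> rw [hx1] <;> omega
      have h1 := hmin _ hx1mem
      rw [hx1] at h1
      have : y = (x + 1) % 26 := by omega
      rw [hx1, this]
    · simp only [solutionFind, hal]
      apply ih
      · rw [hx1]; omega
      · rw [hx1]; omega
      · exact hy
      · intro z hz
        obtain ⟨hz0, hz26, hzal⟩ := (pv_mem_allowed skip z).mp hz
        have h0 := hmin z hz
        have hyne : y ≠ PySem.Int.mod (x + 1) 26 := fun h => hal (h ▸ hyal)
        have hzne : z ≠ PySem.Int.mod (x + 1) 26 := fun h => hal (h ▸ hzal)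
        rw [hx1] at hyne hzne ⊢
        omega
      · have hyne : y ≠ PySem.Int.mod (x + 1) 26 := fun h => hal (h ▸ hyal)
        rw [hx1] at hyne ⊢
        simp only [Nat.cast_add, Nat.cast_one] at hf ⊢
        omega

-- with fuel 26 the scan finds allowed[count-of-allowed-≤-x mod m]
theorem pv_find_first (skip : String) (x : Int) (hne : solutionAllowed skip ≠ [])
    (hx0 : 0 ≤ x) (hx26 : x < 26) :
    solutionFind skip x 26 =
      some ((solutionAllowed skip).getD
        ((solutionAllowed skip).countP (fun p => decide (p ≤ x)) % (solutionAllowed skip).length) 0) := by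
  set L := solutionAllowed skip with hLdef
  set k := L.countP (fun p => decide (p ≤ x)) with hkdef
  have hm : 0 < L.length := List.length_pos_iff.mpr hne
  by_cases hk : k < L.length
  · rw [Nat.mod_eq_of_lt hk]
    obtain ⟨hgt, hminL⟩ := pv_sorted_next L (pv_pairwise_allowed skip) x hk
    set y := L.getD k 0 with hydef
    have hymem : y ∈ L := by
      rw [hydef, List.getD_eq_getElem L 0 hk]
      exact List.getElem_mem hk
    obtain ⟨hy0, hy26, _⟩ := (pv_mem_allowed skip y).mp hymem
    apply pv_find_spec skip 26 x y hx0 hx26 hymem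
    · intro z hz
      obtain ⟨hz0, hz26, _⟩ := (pv_mem_allowed skip z).mp hz
      by_cases hzx : x < z
      · have := hminL z hz hzx
        omega
      · omega
    · have := Int.emod_lt_of_pos (y - x - 1) (by norm_num : (0:Int) < 26)
      norm_num
      omega
  · have hkle : k ≤ L.length := List.countP_le_length
    have hkm : k = L.length := by omega
    have hall : ∀ z ∈ L, z ≤ x := by
      intro z hz
      have : ∀ z ∈ L, (fun p => decide (p ≤ x)) z := by
        rw [← List.countP_eq_length]
        exact hkm
      simpa using this z hz
    rw [hkm, Nat.mod_self]
    set y := L.getD 0 0 with hydef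
    have hymem : y ∈ L := by
      rw [hydef, List.getD_eq_getElem L 0 hm]
      exact List.getElem_mem hm
    obtain ⟨hy0, hy26, _⟩ := (pv_mem_allowed skip y).mp hymem
    have hyx : y ≤ x := hall y hymem
    apply pv_find_spec skip 26 x y hx0 hx26 hymem
    · intro z hz
      obtain ⟨hz0, hz26, _⟩ := (pv_mem_allowed skip z).mp hz
      have hzx : z ≤ x := hall z hz
      have hyz : y ≤ z := pv_sorted_head_le L (pv_pairwise_allowed skip) z hz
      omega
    · have := Int.emod_lt_of_pos (y - x - 1) (by norm_num : (0:Int) < 26)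
      norm_num
      omega

-- the counting loop: n+1 hits from x land on allowed[(count-≤-x + n) mod m]
theorem pv_loop_spec (skip : String) (hne : solutionAllowed skip ≠ []) :
    ∀ (n : Nat) (x : Int), 0 ≤ x → x < 26 →
    solutionLoop skip x (n + 1) =
      (solutionAllowed skip).getD
        (((solutionAllowed skip).countP (fun p => decide (p ≤ x)) + n) % (solutionAllowed skip).length) 0 := by
  intro n
  induction n with
  | zero =>
    intro x hx0 hx26
    simp only [solutionLoop]
    rw [pv_find_first skip x hne hx0 hx26]
    simp
  | succ n ih =>
    intro x hx0 hx26
    have hm : 0 < (solutionAllowed skip).length := List.length_pos_iff.mpr hne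
    set L := solutionAllowed skip with hLdef
    set k := L.countP (fun p => decide (p ≤ x)) with hkdef
    have step : solutionLoop skip x (n + 1 + 1) = solutionLoop skip (L.getD (k % L.length) 0) (n + 1) := by
      conv_lhs => rw [show n + 1 + 1 = (n + 1) + 1 from rfl]
      simp only [solutionLoop]
      rw [pv_find_first skip x hne hx0 hx26]
    rw [step]
    have hkm : k % L.length < L.length := Nat.mod_lt _ hm
    have hymem : L.getD (k % L.length) 0 ∈ L := by
      rw [List.getD_eq_getElem L 0 hkm]
      exact List.getElem_mem hkm
    obtain ⟨hy0, hy26, _⟩ := (pv_mem_allowed skip _).mp hymem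
    rw [ih _ hy0 hy26]
    rw [pv_sorted_count_self L (pv_pairwise_allowed skip) (k % L.length) hkm]
    congr 1
    conv_lhs => rw [show k % L.length + 1 + n = k % L.length + (1 + n) from by omega]
    rw [Nat.mod_add_mod]
    congr 1
    omega

-- per-character agreement when index > 0 and some letter is allowed
theorem pv_char_spec (skip : String) (hne : solutionAllowed skip ≠ []) (index : Int)
    (hpos : 0 < index) (c : Char) :
    pvChr (solutionLoop skip ((c.toNat : Int) - 97) index.toNat) =
      pvChr ((PySem.List.pyGet? (solutionAllowed skip)
        (PySem.Int.mod
          (((solutionAllowed skip).countP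
              (fun p => decide (p ≤ PySem.Int.mod ((c.toNat : Int) - 97) 26)) : Int) + index - 1)
          ((solutionAllowed skip).length : Int))).getD 0) := by
  set L := solutionAllowed skip with hLdef
  have hm : 0 < L.length := List.length_pos_iff.mpr hne
  set x : Int := (c.toNat : Int) - 97 with hxdef
  set x0 : Int := PySem.Int.mod x 26 with hx0def
  have hx0e : x0 = x % 26 := PySem.Int.mod_eq_emod_of_pos (by norm_num)
  set k := L.countP (fun p => decide (p ≤ x0)) with hkdef
  set n : Nat := (index - 1).toNat with hndef
  have hidx : index.toNat = n + 1 := by omega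
  have hx00 : 0 ≤ x0 := by rw [hx0e]; omega
  have hx026 : x0 < 26 := by rw [hx0e]; omega
  have hff := pv_find_first skip x0 hne hx00 hx026
  -- normalize the start: the first scan step only depends on x mod 26
  have hnorm : solutionLoop skip x (n + 1) = solutionLoop skip x0 (n + 1) := by
    simp only [solutionLoop]
    rw [pv_find_norm skip 26 x, ← hx0def, hff]
  rw [hidx, hnorm, pv_loop_spec skip hne n x0 hx00 hx026]
  -- now identify B's Int index with the Nat index (k + n) % L.length
  have harg : PySem.Int.mod ((k : Int) + index - 1) (L.length : Int) = (((k + n) % L.length : Nat) : Int) := by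
    have h1 : PySem.Int.mod ((k : Int) + index - 1) (L.length : Int) =
        ((k : Int) + index - 1) % (L.length : Int) :=
      PySem.Int.mod_eq_emod_of_pos (by exact_mod_cast hm)
    have h2 : (k : Int) + index - 1 = ((k + n : Nat) : Int) := by push_cast; omega
    rw [h1, h2, ← Int.natCast_emod]
  rw [harg]
  have hget : PySem.List.pyGet? L (((k + n) % L.length : Nat) : Int) = L[(k + n) % L.length]? :=
    PySem.List.pyGet?_natCast L _
  rw [hget]
  congr 1

-- ===== VERDICT (by name: the statement is the Claim_ definition above) =====
theorem solution_spec : Claim_equal_solution := by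
  intro s skip index _ hpre
  unfold Spec_solution
  by_cases hidx : index ≤ 0
  · unfold solution solution_alt
    rw [if_pos hidx]
    have h0 : index.toNat = 0 := Int.toNat_of_nonpos hidx
    rw [h0]
    rw [PySem.List.foldl_append_singleton_eq_map]
    have : ∀ c : Char, pvChr (solutionLoop skip ((c.toNat : Int) - 97) 0) = c := by
      intro c
      simp only [solutionLoop, pvChr]
      have : ((c.toNat : Int) - 97 + 97).toNat = c.toNat := by omega
      rw [this, Char.ofNat_toNat]
    simp [this]
  · have hpos : 0 < index := by omega
    have hne : solutionAllowed skip ≠ [] := by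
      rcases hpre with h | h
      · omega
      · obtain ⟨i, hi, hali⟩ := List.any_eq_true.mp h
        intro hnil
        have : i ∈ solutionAllowed skip := by
          rw [pv_mem_allowed]
          rw [PySem.List.mem_pyRange_one] at hi
          exact ⟨hi.1, hi.2, hali⟩
        rw [hnil] at this
        simp at this
    unfold solution solution_alt
    rw [if_neg hidx]
    rw [PySem.List.foldl_append_singleton_eq_map]
    congr 1
    apply List.map_congr_left
    intro c _
    exact pv_char_spec skip hne index hpos c
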